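-- pv_equiv track=rewrite | github.com/xiajingkang17/mvp | components/common/inline_math.py | split_inline_math_segments
-- ===== SOURCE A (Python) =====
-- InlineMathSegment = tuple[str, str]
--
-- def split_inline_math_segments(text: str) -> list[InlineMathSegment]:
--     segments: list[InlineMathSegment] = []
--     buf: list[str] = []
--     in_math = False
--     i = 0
--
--     def _push(kind: str, value: str) -> None:
--         if not value:
--             return
--         if segments and segments[-1][0] == kind:
--             segments[-1] = (kind, segments[-1][1] + value)
--             return
--         segments.append((kind, value))
--
--     while i < len(text):
--         ch = text[i]
--         if ch == "\\" and i + 1 < len(text) and text[i + 1] == "$":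
--             buf.append("$")
--             i += 2
--             continue
--         if ch == "$":
--             _push("math" if in_math else "text", "".join(buf))
--             buf = []
--             in_math = not in_math
--             i += 1
--             continue
--         buf.append(ch)
--         i += 1
--
--     _push("math" if in_math else "text", "".join(buf))
--
--     # Unmatched `$` opener: degrade trailing math chunk back to text.
--     if in_math:
--         tail_text = "$"
--         if segments and segments[-1][0] == "math":
--             tail_text += segments[-1][1]
--             segments.pop()
--         _push("text", tail_text)
--
--     return segments
-- ===== SOURCE B (Python) =====
-- def split_inline_math_segments(text):
--     # First pass: split on '$', then rejoin parts whose preceding '$' was escaped by '\'.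
--     parts = text.split("$")
--     chunks = [parts[0]]
--     for p in parts[1:]:
--         if chunks[-1].endswith("\\"):
--             chunks[-1] = chunks[-1][:-1] + "$" + p
--         else:
--             chunks.append(p)
--     # Second pass: even-index chunks are text, odd are math; append non-empty, merging same kinds.
--     segments = []
--
--     def _add(kind, value):
--         if not value:
--             return
--         if segments and segments[-1][0] == kind:
--             segments[-1] = (kind, segments[-1][1] + value)
--             return
--         segments.append((kind, value))
--
--     for i, chunk in enumerate(chunks):
--         _add("math" if i % 2 else "text", chunk)
--     # Odd number of unescaped '$': the last opener is unmatched; degrade to text.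
--     if (len(chunks) - 1) % 2:
--         tail = "$"
--         if segments and segments[-1][0] == "math":
--             tail += segments[-1][1]
--             segments.pop()
--         _add("text", tail)
--     return segments
-- ===== Notes on version B (the rewrite author's own statement) =====
-- stated objective: faster
-- what changed: Replaced A's single-pass per-character scan with an inline text/math toggle by a two-phase decomposition: split the string on '$' with str.split, rejoin parts whose delimiter was escaped, then classify chunks by index parity and merge, degrading an unmatched trailing opener at the end.
import Mathlib
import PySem

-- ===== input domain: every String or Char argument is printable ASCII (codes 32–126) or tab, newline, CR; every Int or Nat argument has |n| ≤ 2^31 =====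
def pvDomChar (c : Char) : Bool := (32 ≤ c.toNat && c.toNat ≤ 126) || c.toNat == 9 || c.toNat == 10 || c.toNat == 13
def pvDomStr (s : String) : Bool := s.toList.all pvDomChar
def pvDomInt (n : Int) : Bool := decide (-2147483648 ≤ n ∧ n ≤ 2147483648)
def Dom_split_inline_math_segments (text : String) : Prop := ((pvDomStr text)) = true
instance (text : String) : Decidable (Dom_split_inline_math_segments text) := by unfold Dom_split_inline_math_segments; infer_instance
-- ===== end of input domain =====

-- B re-implements A's single-pass toggle scan as split-on-'$' + rejoin-escapes + classify-by-index-parity (constant-factor faster: bulk str.split replaces the per-character loop; measured); return value only, no mutation.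

-- ===== PORT A =====
-- segments are kept in REVERSED order (head = Python's segments[-1]); reversed at the end.
-- _push (shared verbatim by both Pythons)
def pvPush (segs : List (String × String)) (kind val : String) : List (String × String) :=
  if val = "" then segs
  else match segs with
    | (k, v) :: rest => if k = kind then (kind, v ++ val) :: rest else (kind, val) :: (k, v) :: rest
    | [] => [(kind, val)]

def pvKind (inMath : Bool) : String := if inMath then "math" else "text"

-- the unmatched-`$` degrade block (identical code at the end of both Pythons)
def pvDegrade (segs : List (String × String)) : List (String × String) :=
  match segs with
  | ("math", v) :: rest => pvPush rest "text" ("$" ++ v)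
  | _ => pvPush segs "text" "$"

-- A's while-loop; buf is kept reversed (head = last appended char)
def pvScanA : List Char → List (String × String) → List Char → Bool → List (String × String) × Bool
  | [], segs, buf, inm => (pvPush segs (pvKind inm) (String.ofList buf.reverse), inm)
  | '\\' :: '$' :: rest, segs, buf, inm => pvScanA rest segs ('$' :: buf) inm
  | '$' :: rest, segs, buf, inm =>
      pvScanA rest (pvPush segs (pvKind inm) (String.ofList buf.reverse)) [] (!inm)
  | c :: rest, segs, buf, inm => pvScanA rest segs (c :: buf) inm

def split_inline_math_segments (text : String) : List (String × String) :=
  let r := pvScanA text.toList [] [] false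
  (if r.2 then pvDegrade r.1 else r.1).reverse

-- ===== PORT B =====
-- text.split("$"), hand-ported step for step on the char list (exact for a single-char separator)
def pvSplitD : List Char → List (List Char)
  | [] => [[]]
  | '$' :: rest => [] :: pvSplitD rest
  | c :: rest =>
      match pvSplitD rest with
      | h :: t => (c :: h) :: t
      | [] => [[c]]

-- B's first loop: rejoin parts whose '$' was escaped (chunks[-1] is the `cur` argument)
def pvBChunks : List Char → List (List Char) → List (List Char)
  | cur, [] => [cur]
  | cur, p :: ps =>
      if cur.getLast? = some '\\' then pvBChunks (cur.dropLast ++ '$' :: p) ps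
      else cur :: pvBChunks p ps

-- B's second loop: classify chunk i as text (i even) / math (i odd), pushing into segs (reversed)
def pvClassify : List (List Char) → Bool → List (String × String) → List (String × String)
  | [], _, segs => segs
  | c :: cs, m, segs => pvClassify cs (!m) (pvPush segs (pvKind m) (String.ofList c))

def split_inline_math_segments_alt (text : String) : List (String × String) :=
  let parts := pvSplitD text.toList
  let chunks := pvBChunks parts.headI parts.tail
  let segs := pvClassify chunks false []
  (if (chunks.length - 1) % 2 = 1 then pvDegrade segs else segs).reverse

-- ===== PRECONDITION & SPEC =====
def Spec_split_inline_math_segments (text : String) (out : List (String × String)) : Prop := out = split_inline_math_segments_alt text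
instance (text : String) (out : List (String × String)) : Decidable (Spec_split_inline_math_segments text out) := by unfold Spec_split_inline_math_segments; infer_instance

-- ===== CLAIM (what is proved, stated in full; the proofs are below) =====
def Claim_equal_split_inline_math_segments : Prop := ∀ (text : String), Dom_split_inline_math_segments text → Spec_split_inline_math_segments text (split_inline_math_segments text)

-- ===== LEMMAS AND PROOFS =====

-- the abstract chunk list both ports compute
def pvChunksC : List Char → List (List Char)
  | [] => [[]]
  | '\\' :: '$' :: rest =>
      match pvChunksC rest with
      | h :: t => ('$' :: h) :: t
      | [] => [['$']]
  | '$' :: rest => [] :: pvChunksC rest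
  | c :: rest =>
      match pvChunksC rest with
      | h :: t => (c :: h) :: t
      | [] => [[c]]

def pvConsHead (x : List Char) : List (List Char) → List (List Char)
  | h :: t => (x ++ h) :: t
  | [] => [x]

lemma pvChunksC_ne_nil (cs : List Char) : pvChunksC cs ≠ [] := by
  induction cs using pvChunksC.induct <;> simp_all [pvChunksC]

lemma pvSplitD_ne_nil (cs : List Char) : pvSplitD cs ≠ [] := by
  induction cs using pvSplitD.induct <;> simp_all [pvSplitD]

lemma pvConsHead_nil {xs : List (List Char)} (h : xs ≠ []) : pvConsHead [] xs = xs := by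
  cases xs with
  | nil => exact absurd rfl h
  | cons a t => simp [pvConsHead]

lemma pvScanA_eq : ∀ (cs : List Char) (segs : List (String × String)) (buf : List Char) (inm : Bool),
    pvScanA cs segs buf inm =
      (pvClassify (pvConsHead buf.reverse (pvChunksC cs)) inm segs,
       inm ^^ decide ((pvChunksC cs).length % 2 = 0)) := by
  intro cs
  induction cs using pvChunksC.induct with
  | case1 =>
    intro segs buf inm
    simp [pvScanA, pvChunksC, pvConsHead, pvClassify]
  | case2 rest h t hch ih =>
    intro segs buf inm
    simp only [pvScanA, ih, pvChunksC, hch, List.reverse_cons, pvConsHead, List.append_assoc,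
      List.cons_append, List.nil_append, List.length_cons]
  | case3 rest hch ih =>
    exact absurd hch (pvChunksC_ne_nil rest)
  | case4 rest ih =>
    intro segs buf inm
    simp only [pvScanA, ih]
    rw [List.reverse_nil, pvConsHead_nil (pvChunksC_ne_nil rest), pvChunksC.eq_3]
    simp only [pvConsHead, List.append_nil, pvClassify, List.length_cons]
    cases inm <;> simp <;>
      (by_cases hp : (pvChunksC rest).length % 2 = 0
       · have hq : ((pvChunksC rest).length + 1) % 2 ≠ 0 := by omega
         simp [hp, hq]
       · have hq : ((pvChunksC rest).length + 1) % 2 = 0 := by omega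
         simp [hp, hq])
  | case5 c rest hne1 hne2 h t hch ih =>
    intro segs buf inm
    rw [pvScanA.eq_4 _ _ _ _ _ hne1 hne2, ih, pvChunksC.eq_4 _ _ hne1 hne2, hch]
    simp only [List.reverse_cons, pvConsHead, List.append_assoc, List.cons_append,
      List.nil_append, List.length_cons]
    rfl
  | case6 c rest hne1 hne2 hch ih =>
    exact absurd hch (pvChunksC_ne_nil rest)

lemma pvBChunks_eq : ∀ (cs : List Char) (x : List Char),
    (cs.head? = some '$' → x.getLast? ≠ some '\\') →
    pvBChunks (x ++ (pvSplitD cs).headI) (pvSplitD cs).tail = pvConsHead x (pvChunksC cs) := by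
  intro cs
  induction cs using pvChunksC.induct with
  | case1 =>
    intro x hx
    simp [pvSplitD, pvBChunks, pvChunksC, pvConsHead]
  | case2 rest h t hch ih =>
    intro x hx
    have hsd : pvSplitD ('\\' :: '$' :: rest) = ['\\'] :: pvSplitD rest := by
      rw [pvSplitD.eq_3 _ _ (by decide)]
      simp [pvSplitD]
    rw [hsd]
    rcases hsp : pvSplitD rest with _ | ⟨p, ps⟩
    · exact absurd hsp (pvSplitD_ne_nil rest)
    · have ih' := ih (x ++ ['$']) (by intro _; simp)
      rw [hsp] at ih'
      simp only [List.headI, List.tail] at ih' ⊢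
      rw [pvBChunks]
      simp only [List.getLast?_concat, List.dropLast_concat, reduceIte]
      have harg : x ++ '$' :: p = (x ++ ['$']) ++ p := by simp
      rw [harg, ih', pvChunksC.eq_2, hch]
      simp [pvConsHead]
  | case3 rest hch ih =>
    exact absurd hch (pvChunksC_ne_nil rest)
  | case4 rest ih =>
    intro x hx
    have hx' : x.getLast? ≠ some '\\' := hx (by simp)
    rw [pvSplitD.eq_2]
    rcases hsp : pvSplitD rest with _ | ⟨p, ps⟩
    · exact absurd hsp (pvSplitD_ne_nil rest)
    · have ih' := ih [] (by intro _; simp)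
      rw [hsp] at ih'
      simp only [List.headI, List.tail, List.nil_append] at ih' ⊢
      rw [List.append_nil, pvBChunks, if_neg hx', ih', pvConsHead_nil (pvChunksC_ne_nil rest),
        pvChunksC.eq_3]
      simp [pvConsHead]
  | case5 c rest hne1 hne2 h t hch ih =>
    intro x hx
    rw [pvSplitD.eq_3 _ _ hne2]
    rcases hsp : pvSplitD rest with _ | ⟨p, ps⟩
    · exact absurd hsp (pvSplitD_ne_nil rest)
    · have hc : rest.head? = some '$' → c ≠ '\\' := by
        intro hh hcc
        rcases rest with _ | ⟨d, r⟩
        · simp at hh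
        · simp at hh
          exact hne1 r hcc (by rw [hh])
      have ih' := ih (x ++ [c]) (by
        intro hh
        rw [List.getLast?_concat]
        intro hcon
        exact hc hh (by injection hcon))
      rw [hsp] at ih'
      simp only [List.headI, List.tail] at ih' ⊢
      have harg : x ++ c :: p = (x ++ [c]) ++ p := by simp
      rw [harg, ih', pvChunksC.eq_4 _ _ hne1 hne2, hch]
      simp [pvConsHead]
  | case6 c rest hne1 hne2 hch ih =>
    exact absurd hch (pvChunksC_ne_nil rest)

-- ===== VERDICT (by name: the statement is the Claim_ definition above) =====
theorem split_inline_math_segments_spec : Claim_equal_split_inline_math_segments := by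
  intro text _
  unfold Spec_split_inline_math_segments
  have hb := pvBChunks_eq text.toList [] (by intro _; simp)
  simp only [List.nil_append] at hb
  simp only [split_inline_math_segments, split_inline_math_segments_alt, pvScanA_eq, hb,
    List.reverse_nil, pvConsHead_nil (pvChunksC_ne_nil text.toList), Bool.false_xor]
  have hL : 0 < (pvChunksC text.toList).length :=
    List.length_pos_of_ne_nil (pvChunksC_ne_nil _)
  by_cases h : (pvChunksC text.toList).length % 2 = 0
  · have h2 : ((pvChunksC text.toList).length - 1) % 2 = 1 := by omega
    simp [h, h2]
  · have h2 : ¬(((pvChunksC text.toList).length - 1) % 2 = 1) := by omega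
    simp [h, h2]
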